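-- pv_equiv track=rewrite | github.com/HeWenjun824699/py-cluster-ensemble | src/pce/consensus/methods/SPACE_TNNLS_2024/alg/transclos.py | transclos
-- ===== SOURCE A (Python) =====
-- def transclos(mustlink):
--     """
--     Transitive closure of must-link constraints.
--
--     Parameters:
--     mustlink : list of sets or lists
--         Each element is a set/list of connected indices.
--
--     Returns:
--     mustlink : list of sets
--         Merged sets representing transitive closure.
--     """
--     # MATLAB uses cells of arrays. Python list of sets is appropriate.
--     # Convert input to list of sets if they are not already
--     mustlink = [set(m) for m in mustlink]
--
--     start = 0
--     num_must = len(mustlink)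
--
--     while start < num_must:
--         flag = 0
--         i = start + 1
--
--         # We need to be careful about modifying list while iterating
--         # Use while loop similar to MATLAB
--         while i < num_must:
--             # MATLAB: intersect(mustlink{start}, mustlink{i})
--             if not mustlink[start].isdisjoint(mustlink[i]):
--                 # MATLAB: union(mustlink{start}, mustlink{i})
--                 mustlink[start] = mustlink[start].union(mustlink[i])
--                 # MATLAB: mustlink(i)=[];
--                 mustlink.pop(i)
--                 num_must -= 1
--                 flag = 1
--             else:
--                 i += 1
--
--         if flag == 0:
--             start += 1
--
--     return mustlink
-- ===== SOURCE B (Python) =====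
-- def transclos(mustlink):
--     """Transitive closure of must-link constraints (functional pass/partition formulation)."""
--     def saturate(s, rest):
--         # Repeat single passes: absorb every set intersecting the growing s,
--         # keep the others (in order) as leftover, until a pass absorbs nothing.
--         while True:
--             leftover = []
--             for t in rest:
--                 if not s.isdisjoint(t):
--                     s = s.union(t)
--                 else:
--                     leftover.append(t)
--             if len(leftover) == len(rest):
--                 return s, leftover
--             rest = leftover
--
--     comps = []
--     rest = [set(m) for m in mustlink]
--     while rest:
--         s, rest = saturate(rest[0], rest[1:])
--         comps.append(s)
--     return comps
-- ===== Notes on version B (the rewrite author's own statement) =====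
-- stated objective: alternative
-- what changed: Replaces A's in-place index/pop/flag while-loops over one shared mutable list by a functional decomposition: a saturate helper that repeatedly partitions the remaining sets into absorbed and leftover until a pass absorbs nothing, driven by a loop that peels one component at a time into an output list.
import Mathlib
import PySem

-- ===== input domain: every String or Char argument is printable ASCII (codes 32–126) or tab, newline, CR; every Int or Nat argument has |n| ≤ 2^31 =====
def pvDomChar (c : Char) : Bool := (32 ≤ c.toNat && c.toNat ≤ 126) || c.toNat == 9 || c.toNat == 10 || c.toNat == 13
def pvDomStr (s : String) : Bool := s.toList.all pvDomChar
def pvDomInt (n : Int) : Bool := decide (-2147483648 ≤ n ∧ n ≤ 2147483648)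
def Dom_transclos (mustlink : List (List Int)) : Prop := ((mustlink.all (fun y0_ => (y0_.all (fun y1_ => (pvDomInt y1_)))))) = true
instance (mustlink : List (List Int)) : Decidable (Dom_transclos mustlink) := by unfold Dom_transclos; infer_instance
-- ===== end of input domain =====

-- B re-states A's in-place index/pop/flag merging as a functional pass-and-partition
-- recursion with an output accumulator (objective: alternative/clearer decomposition;
-- same asymptotic cost). Inner lists model Python sets (insertion-order PySem.Set).
-- All loops take an explicit fuel that is provably sufficient (a totality guard only;
-- the fuel-0 branches are unreachable at the stated call sites).

-- ===== PORT A =====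
-- A's inner 'while i < num_must' loop: compare slot `start` with slot `i`; on overlap,
-- union into slot `start` and pop slot `i` (eraseIdx; indices are always in range, so
-- getD/eraseIdx are exact), setting flag; otherwise advance i.  num_must is always the
-- current length of the list, so it is not carried separately.
def transclosInner (fuel : Nat) (ml : List (PySem.Set Int)) (start i : Nat) (flag : Bool) :
    List (PySem.Set Int) × Bool :=
  match fuel with
  | 0 => (ml, flag)
  | fuel + 1 =>
      if i < ml.length then
        if PySem.Set.isdisjoint (ml.getD start []) (ml.getD i []) then
          transclosInner fuel ml start (i + 1) flag
        else
          transclosInner fuel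
            ((ml.set start (PySem.Set.union (ml.getD start []) (ml.getD i []))).eraseIdx i)
            start i true
      else
        (ml, flag)

-- A's outer 'while start < num_must' loop: run one pass; if it merged, repeat at the
-- same start, else advance start.
def transclosOuter (fuel : Nat) (ml : List (PySem.Set Int)) (start : Nat) :
    List (PySem.Set Int) :=
  match fuel with
  | 0 => ml
  | fuel + 1 =>
      if start < ml.length then
        if (transclosInner ml.length ml start (start + 1) false).2 then
          transclosOuter fuel (transclosInner ml.length ml start (start + 1) false).1 start
        else
          transclosOuter fuel (transclosInner ml.length ml start (start + 1) false).1 (start + 1)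
      else
        ml

def transclos (mustlink : List (List Int)) : List (List Int) :=
  -- mustlink = [set(m) for m in mustlink]; then the two nested while loops
  transclosOuter ((mustlink.map (fun m => PySem.Set.ofList m)).length + 1)
    (mustlink.map (fun m => PySem.Set.ofList m)) 0

-- ===== PORT B =====
-- Source B's single pass over rest: fold with state (s, leftover)
def transclosPassFold (s : PySem.Set Int) (rest : List (PySem.Set Int)) :
    PySem.Set Int × List (PySem.Set Int) :=
  rest.foldl
    (fun (st : PySem.Set Int × List (PySem.Set Int)) t =>
      if PySem.Set.isdisjoint st.1 t then (st.1, st.2 ++ [t])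
      else (PySem.Set.union st.1 t, st.2))
    (s, [])

-- Source B's saturate: repeat passes until one absorbs nothing
def transclosSaturate (fuel : Nat) (s : PySem.Set Int) (rest : List (PySem.Set Int)) :
    PySem.Set Int × List (PySem.Set Int) :=
  match fuel with
  | 0 => (s, rest)
  | fuel + 1 =>
      if (transclosPassFold s rest).2.length = rest.length then transclosPassFold s rest
      else transclosSaturate fuel (transclosPassFold s rest).1 (transclosPassFold s rest).2

-- Source B's driver: peel the first set, saturate it against the rest, append the component
def transclosAltLoop (fuel : Nat) (rest comps : List (PySem.Set Int)) :
    List (PySem.Set Int) :=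
  match fuel, rest with
  | 0, _ => comps
  | _ + 1, [] => comps
  | fuel + 1, s :: rs =>
      transclosAltLoop fuel (transclosSaturate (rs.length + 1) s rs).2
        (comps ++ [(transclosSaturate (rs.length + 1) s rs).1])

def transclos_alt (mustlink : List (List Int)) : List (List Int) :=
  transclosAltLoop (mustlink.map (fun m => PySem.Set.ofList m)).length
    (mustlink.map (fun m => PySem.Set.ofList m)) []

-- ===== PRECONDITION & SPEC =====
def Spec_transclos (mustlink : List (List Int)) (out : List (List Int)) : Prop := out = transclos_alt mustlink
instance (mustlink : List (List Int)) (out : List (List Int)) : Decidable (Spec_transclos mustlink out) := by unfold Spec_transclos; infer_instance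

-- ===== CLAIM (what is proved, stated in full; the proofs are below) =====
def Claim_equal_transclos : Prop := ∀ (mustlink : List (List Int)), Dom_transclos mustlink → Spec_transclos mustlink (transclos mustlink)

-- ===== LEMMAS AND PROOFS =====

-- one saturation pass, written as the structural recursion the proofs induct on:
-- returns (union of s with every absorbed set, the sets left over, in order)
def transclosPass (s : PySem.Set Int) (rest : List (PySem.Set Int)) :
    PySem.Set Int × List (PySem.Set Int) :=
  match rest with
  | [] => (s, [])
  | t :: rs =>
      if PySem.Set.isdisjoint s t then
        ((transclosPass s rs).1, t :: (transclosPass s rs).2)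
      else
        transclosPass (PySem.Set.union s t) rs

theorem transclosPassFold_eq_pass (rest : List (PySem.Set Int)) (s : PySem.Set Int)
    (acc : List (PySem.Set Int)) :
    rest.foldl
      (fun (st : PySem.Set Int × List (PySem.Set Int)) t =>
        if PySem.Set.isdisjoint st.1 t then (st.1, st.2 ++ [t])
        else (PySem.Set.union st.1 t, st.2))
      (s, acc)
    = ((transclosPass s rest).1, acc ++ (transclosPass s rest).2) := by
  induction rest generalizing s acc with
  | nil => simp [transclosPass]
  | cons t rs ih =>
      simp only [List.foldl_cons, transclosPass]
      by_cases hd : PySem.Set.isdisjoint s t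
      · rw [if_pos hd, if_pos hd, ih]; simp
      · rw [if_neg hd, if_neg hd, ih]

theorem transclosPassFold_pair (s : PySem.Set Int) (rest : List (PySem.Set Int)) :
    transclosPassFold s rest = ((transclosPass s rest).1, (transclosPass s rest).2) := by
  rw [show transclosPassFold s rest
      = rest.foldl _ (s, ([] : List (PySem.Set Int))) from rfl, transclosPassFold_eq_pass]
  simp

theorem transclosPass_length (rest : List (PySem.Set Int)) (s : PySem.Set Int) :
    (transclosPass s rest).2.length ≤ rest.length := by
  induction rest generalizing s with
  | nil => simp [transclosPass]
  | cons t rs ih =>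
      simp only [transclosPass, List.length_cons]
      by_cases hd : PySem.Set.isdisjoint s t
      · rw [if_pos hd]
        have := ih s
        simp only [List.length_cons]
        omega
      · rw [if_neg hd]
        have := ih (PySem.Set.union s t)
        omega

-- a pass that absorbed nothing changed nothing
theorem transclosPass_fix (rest : List (PySem.Set Int)) (s : PySem.Set Int)
    (h : (transclosPass s rest).2.length = rest.length) :
    transclosPass s rest = (s, rest) := by
  induction rest generalizing s with
  | nil => simp [transclosPass]
  | cons t rs ih =>
      by_cases hd : PySem.Set.isdisjoint s t
      · simp only [transclosPass, if_pos hd, List.length_cons] at h ⊢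
        have hl : (transclosPass s rs).2.length = rs.length := by omega
        rw [ih s hl]
      · simp only [transclosPass, if_neg hd, List.length_cons] at h
        have := transclosPass_length rs (PySem.Set.union s t)
        omega

-- one unfolding of saturate, with the pass fold replaced by transclosPass
theorem transclosSaturate_succ (fuel : Nat) (s : PySem.Set Int)
    (rest : List (PySem.Set Int)) :
    transclosSaturate (fuel + 1) s rest =
      if (transclosPass s rest).2.length = rest.length then (s, rest)
      else transclosSaturate fuel (transclosPass s rest).1 (transclosPass s rest).2 := by
  rw [transclosSaturate, transclosPassFold_pair]
  by_cases h : (transclosPass s rest).2.length = rest.length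
  · rw [if_pos h, if_pos h, transclosPass_fix rest s h]
  · rw [if_neg h, if_neg h]

theorem transclosSaturate_length (fuel : Nat) :
    ∀ (s : PySem.Set Int) (rest : List (PySem.Set Int)),
    (transclosSaturate fuel s rest).2.length ≤ rest.length := by
  induction fuel with
  | zero => intro s rest; rw [transclosSaturate]
  | succ fuel ih =>
      intro s rest
      rw [transclosSaturate_succ]
      by_cases h : (transclosPass s rest).2.length = rest.length
      · rw [if_pos h]
      · rw [if_neg h]
        have h1 := ih (transclosPass s rest).1 (transclosPass s rest).2
        have h2 := transclosPass_length rest s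
        omega

-- saturate does not depend on the fuel, as long as the fuel suffices
theorem transclosSaturate_suff (f : Nat) :
    ∀ (g : Nat) (s : PySem.Set Int) (rest : List (PySem.Set Int)),
    rest.length < f → rest.length < g →
    transclosSaturate f s rest = transclosSaturate g s rest := by
  induction f with
  | zero => intro g s rest hf hg; omega
  | succ f ih =>
      intro g s rest hf hg
      match g with
      | 0 => omega
      | g + 1 =>
          rw [transclosSaturate_succ, transclosSaturate_succ]
          by_cases h : (transclosPass s rest).2.length = rest.length
          · rw [if_pos h, if_pos h]
          · rw [if_neg h, if_neg h]
            have := transclosPass_length rest s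
            exact ih g _ _ (by omega) (by omega)

-- nor does the driver loop
theorem transclosAltLoop_suff (f : Nat) :
    ∀ (g : Nat) (rest comps : List (PySem.Set Int)),
    rest.length ≤ f → rest.length ≤ g →
    transclosAltLoop f rest comps = transclosAltLoop g rest comps := by
  induction f with
  | zero =>
      intro g rest comps hf hg
      have h0 : rest = [] := List.length_eq_zero_iff.mp (by omega)
      subst h0
      match g with
      | 0 => rfl
      | g + 1 => rw [transclosAltLoop, transclosAltLoop]
  | succ f ih =>
      intro g rest comps hf hg
      match rest with
      | [] =>
          match g with
          | 0 => rw [transclosAltLoop, transclosAltLoop]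
          | g + 1 => rw [transclosAltLoop, transclosAltLoop]
      | s :: rs =>
          match g with
          | 0 => simp at hg
          | g + 1 =>
              rw [transclosAltLoop, transclosAltLoop]
              have hsat := transclosSaturate_length (rs.length + 1) s rs
              simp only [List.length_cons] at hf hg
              exact ih g _ _ (by omega) (by omega)

-- the driver's accumulator is a plain prefix
theorem transclosAltLoop_acc (fuel : Nat) :
    ∀ (rest comps : List (PySem.Set Int)), rest.length ≤ fuel →
    transclosAltLoop fuel rest comps = comps ++ transclosAltLoop fuel rest [] := by
  induction fuel with
  | zero =>
      intro rest comps hn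
      have h0 : rest = [] := List.length_eq_zero_iff.mp (by omega)
      subst h0
      simp [transclosAltLoop]
  | succ fuel ih =>
      intro rest comps hn
      match rest with
      | [] => simp [transclosAltLoop]
      | s :: rs =>
          rw [transclosAltLoop, transclosAltLoop]
          have hlen : (transclosSaturate (rs.length + 1) s rs).2.length ≤ fuel := by
            have h1 := transclosSaturate_length (rs.length + 1) s rs
            simp only [List.length_cons] at hn
            omega
          rw [ih _ _ hlen, ih _ ([] ++ [(transclosSaturate (rs.length + 1) s rs).1]) hlen]
          simp

-- erasing exactly at the boundary of an append drops the head of the suffix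
theorem eraseIdx_append_length (l m : List (PySem.Set Int)) :
    (l ++ m).eraseIdx l.length = l ++ m.eraseIdx 0 := by
  induction l with
  | nil => simp
  | cons a t ih => simp [ih]

-- A's inner loop, started at i = pre.length on pre ++ rest with start < pre.length,
-- performs exactly one transclosPass of slot `start` against rest
theorem transclosInner_eq_pass (rest : List (PySem.Set Int)) :
    ∀ (pre : List (PySem.Set Int)) (start : Nat) (flag : Bool) (fuel : Nat),
    start < pre.length → rest.length ≤ fuel →
    transclosInner fuel (pre ++ rest) start pre.length flag
      = (pre.set start (transclosPass (pre.getD start []) rest).1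
           ++ (transclosPass (pre.getD start []) rest).2,
         flag || ((transclosPass (pre.getD start []) rest).2.length != rest.length)) := by
  induction rest with
  | nil =>
      intro pre start flag fuel h hfuel
      have hend : (pre ++ ([] : List (PySem.Set Int)), flag)
          = (pre.set start (transclosPass (pre.getD start []) []).1
              ++ (transclosPass (pre.getD start []) []).2,
             flag || ((transclosPass (pre.getD start []) []).2.length
               != ([] : List (PySem.Set Int)).length)) := by
        simp only [transclosPass, List.append_nil]
        rw [List.getD_eq_getElem _ _ h, List.set_getElem_self]
        simp
      match fuel with
      | 0 => rw [transclosInner]; exact hend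
      | fuel + 1 => rw [transclosInner, if_neg (by simp)]; exact hend
  | cons t rs ih =>
      intro pre start flag fuel h hfuel
      match fuel with
      | 0 => simp at hfuel
      | fuel + 1 =>
          have hlen : pre.length < (pre ++ t :: rs).length := by simp
          have hs : (pre ++ t :: rs).getD start [] = pre.getD start [] := by
            rw [List.getD_eq_getElem _ _ (by simp; omega), List.getD_eq_getElem _ _ h,
              List.getElem_append_left h]
          have ht : (pre ++ t :: rs).getD pre.length [] = t := by
            rw [List.getD_eq_getElem _ _ hlen]
            simp
          rw [transclosInner, if_pos hlen, hs, ht]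
          by_cases hd : PySem.Set.isdisjoint (pre.getD start []) t
          · rw [if_pos hd]
            have h1 : pre ++ t :: rs = (pre ++ [t]) ++ rs := by simp
            have h2 : pre.length + 1 = (pre ++ [t]).length := by simp
            rw [h1, h2, ih (pre ++ [t]) start flag fuel (by simp; omega)
              (by simp only [List.length_cons] at hfuel; omega)]
            have hs2 : (pre ++ [t]).getD start [] = pre.getD start [] := by
              rw [List.getD_eq_getElem _ _ (by simp; omega), List.getD_eq_getElem _ _ h,
                List.getElem_append_left h]
            rw [hs2]
            simp only [transclosPass, if_pos hd, Prod.mk.injEq]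
            refine ⟨?_, ?_⟩
            · rw [List.set_append_left _ _ h]
              simp
            · simp
          · rw [if_neg hd]
            have he : ((pre ++ t :: rs).set start
                  (PySem.Set.union (pre.getD start []) t)).eraseIdx pre.length
                = (pre.set start (PySem.Set.union (pre.getD start []) t)) ++ rs := by
              rw [List.set_append_left _ _ h,
                show pre.length
                  = (pre.set start (PySem.Set.union (pre.getD start []) t)).length from by simp,
                eraseIdx_append_length]
              simp
            have h2 : pre.length
                = (pre.set start (PySem.Set.union (pre.getD start []) t)).length := by
              simp
            rw [he, h2, ih _ start true fuel (by simp; omega)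
              (by simp only [List.length_cons] at hfuel; omega)]
            have hs3 : (pre.set start (PySem.Set.union (pre.getD start []) t)).getD start []
                = PySem.Set.union (pre.getD start []) t := by
              rw [List.getD_eq_getElem _ _ (by simp; omega)]
              exact List.getElem_set_self _
            rw [hs3]
            simp only [transclosPass, if_neg hd, Prod.mk.injEq]
            refine ⟨?_, ?_⟩
            · rw [List.set_set]
            · have := transclosPass_length rs (PySem.Set.union (pre.getD start []) t)
              have hne : ((transclosPass (PySem.Set.union (pre.getD start []) t) rs).2.length
                  != rs.length + 1) = true := by
                simp only [bne_iff_ne, ne_eq]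
                omega
              simp only [Bool.true_or, List.length_cons]
              rw [hne, Bool.or_true]

-- main bridge: A's outer loop from slot `done.length` equals B's driver on the suffix
theorem transclosOuter_eq_altLoop (fuel : Nat) :
    ∀ (rest done : List (PySem.Set Int)), rest.length < fuel →
    transclosOuter fuel (done ++ rest) done.length
      = done ++ transclosAltLoop rest.length rest [] := by
  induction fuel with
  | zero => intro rest done hn; omega
  | succ fuel ih =>
      intro rest done hn
      match rest with
      | [] =>
          rw [transclosOuter, if_neg (by simp)]
          simp [transclosAltLoop]
      | s :: rs =>
          have hlt : done.length < (done ++ s :: rs).length := by simp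
          rw [transclosOuter, if_pos hlt]
          have hpre : done ++ s :: rs = (done ++ [s]) ++ rs := by simp
          have hlen1 : done.length + 1 = (done ++ [s]).length := by simp
          have hslot : (done ++ [s]).getD done.length [] = s := by
            rw [List.getD_eq_getElem _ _ (by simp)]
            simp
          rw [hpre, hlen1,
            transclosInner_eq_pass rs (done ++ [s]) done.length false
              ((done ++ [s]) ++ rs).length (by simp) (by simp; omega),
            hslot]
          have hset : (done ++ [s]).set done.length (transclosPass s rs).1
              = done ++ [(transclosPass s rs).1] := by
            rw [List.set_append_right _ _ (Nat.le_refl _)]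
            simp
          rw [hset]
          by_cases hfix : (transclosPass s rs).2.length = rs.length
          · have hflag : (false || ((transclosPass s rs).2.length != rs.length)) = false := by
              simp [hfix]
            rw [hflag]
            simp only [Bool.false_eq_true, reduceIte]
            rw [transclosPass_fix rs s hfix]
            simp only
            rw [show done ++ [s] ++ rs = (done ++ [s]) ++ rs from by simp,
              ih rs (done ++ [s]) (by simp only [List.length_cons] at hn; omega)]
            rw [show (s :: rs).length = rs.length + 1 from rfl, transclosAltLoop]
            rw [transclosSaturate_succ, if_pos hfix]
            show done ++ [s] ++ transclosAltLoop rs.length rs []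
              = done ++ transclosAltLoop rs.length rs ([] ++ [s])
            rw [transclosAltLoop_acc rs.length rs ([] ++ [s]) (Nat.le_refl _)]
            simp
          · have hflag : (false || ((transclosPass s rs).2.length != rs.length)) = true := by
              simp [hfix]
            rw [hflag]
            simp only [reduceIte]
            have hplen : (transclosPass s rs).2.length < rs.length :=
              Nat.lt_of_le_of_ne (transclosPass_length rs s) hfix
            have hih := ih ((transclosPass s rs).1 :: (transclosPass s rs).2) done
              (by simp only [List.length_cons] at hn ⊢; omega)
            rw [show done ++ [(transclosPass s rs).1] ++ (transclosPass s rs).2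
                = done ++ ((transclosPass s rs).1 :: (transclosPass s rs).2) from by simp,
              hih]
            rw [show ((transclosPass s rs).1 :: (transclosPass s rs).2).length
                = (transclosPass s rs).2.length + 1 from rfl, transclosAltLoop]
            rw [show (s :: rs).length = rs.length + 1 from rfl, transclosAltLoop]
            rw [transclosSaturate_succ rs.length s rs, if_neg hfix]
            rw [transclosSaturate_suff ((transclosPass s rs).2.length + 1) rs.length
              (transclosPass s rs).1 (transclosPass s rs).2 (by omega) hplen]
            have hslen := transclosSaturate_length rs.length
              (transclosPass s rs).1 (transclosPass s rs).2
            rw [transclosAltLoop_suff (transclosPass s rs).2.length rs.length _ _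
              hslen (by omega)]

-- ===== VERDICT (by name: the statement is the Claim_ definition above) =====
theorem transclos_spec : Claim_equal_transclos := by
  intro mustlink _
  unfold Spec_transclos transclos transclos_alt
  have := transclosOuter_eq_altLoop
    ((mustlink.map (fun m => PySem.Set.ofList m)).length + 1)
    (mustlink.map (fun m => PySem.Set.ofList m)) [] (by omega)
  simpa using this
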